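-- pv_equiv track=rewrite | github.com/Erynvorn/Training-Python-2019 | orArraysWithDefaultPadding.py | or_arrays
-- ===== SOURCE A (Python) =====
-- def or_arrays(arr1, arr2, x = 0):
--     ret = []
--     if len(arr1) == len(arr2) :
--         for i in range(len(arr1)):
--             ret.append(arr1[i] | arr2[i])
--         return ret
--     if len(arr1) > len(arr2) :
--         for i in range(len(arr2)):
--             ret.append(arr1[i] | arr2[i] )
--         for j in range(len(arr2), len(arr1)):
--             ret.append(arr1[j] | x)
--         return ret
--
--     if len(arr1) < len(arr2) :
--         for i in range(len(arr1)):
--             ret.append(arr1[i] | arr2[i] )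
--         for j in range(len(arr1),len(arr2)):
--             ret.append(arr2[j] |x)
--         return ret
-- ===== SOURCE B (Python) =====
-- def or_arrays(arr1, arr2, x = 0):
--     n = max(len(arr1), len(arr2))
--     p1 = arr1 + [x] * (n - len(arr1))
--     p2 = arr2 + [x] * (n - len(arr2))
--     return [a | b for a, b in zip(p1, p2)]
-- ===== Notes on version B (the rewrite author's own statement) =====
-- stated objective: alternative
-- what changed: Replaced the three length-comparison branches with separate tail loops by two staged passes: first materialize both arrays padded with x to the common length, then OR the equal-length padded copies pairwise.
import Mathlib
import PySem

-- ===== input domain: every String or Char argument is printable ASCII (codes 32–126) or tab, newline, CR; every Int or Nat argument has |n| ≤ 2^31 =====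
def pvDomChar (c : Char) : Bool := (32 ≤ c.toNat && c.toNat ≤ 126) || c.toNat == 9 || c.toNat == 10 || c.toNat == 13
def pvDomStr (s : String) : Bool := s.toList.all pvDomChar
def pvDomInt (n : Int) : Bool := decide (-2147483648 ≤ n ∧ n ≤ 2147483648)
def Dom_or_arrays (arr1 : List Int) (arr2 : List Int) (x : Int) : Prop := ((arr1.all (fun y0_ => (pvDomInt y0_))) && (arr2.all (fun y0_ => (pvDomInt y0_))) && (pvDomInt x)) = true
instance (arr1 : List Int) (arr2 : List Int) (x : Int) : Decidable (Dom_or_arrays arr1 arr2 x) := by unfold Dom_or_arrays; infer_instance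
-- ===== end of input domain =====

-- B restructures A: instead of branching on which array is longer and running a
-- separate tail loop, B materializes both arrays padded with x to the common
-- length and ORs the equal-length padded copies pairwise (alternative decomposition).

-- ===== PORT A =====
-- A: branch on length comparison; each branch appends element-wise ORs, the tail
-- loop ORs the remainder of the longer array with x. Indices produced by the
-- range loops are always in bounds, so `getD _ 0` is exact here (default unreachable).
def or_arrays (arr1 : List Int) (arr2 : List Int) (x : Int) : List Int :=
  let ret : List Int := []
  if arr1.length = arr2.length then
    (List.range arr1.length).foldl
      (fun ret i => ret ++ [(arr1.getD i 0).lor (arr2.getD i 0)]) ret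
  else if arr1.length > arr2.length then
    let ret := (List.range arr2.length).foldl
      (fun ret i => ret ++ [(arr1.getD i 0).lor (arr2.getD i 0)]) ret
    (List.range' arr2.length (arr1.length - arr2.length)).foldl
      (fun ret j => ret ++ [(arr1.getD j 0).lor x]) ret
  else
    let ret := (List.range arr1.length).foldl
      (fun ret i => ret ++ [(arr1.getD i 0).lor (arr2.getD i 0)]) ret
    (List.range' arr1.length (arr2.length - arr1.length)).foldl
      (fun ret j => ret ++ [(arr2.getD j 0).lor x]) ret

-- ===== PORT B =====
-- B: two staged passes — pad both arrays with x to the common length n, then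
-- zip the equal-length padded copies and OR pairwise.
def or_arrays_alt (arr1 : List Int) (arr2 : List Int) (x : Int) : List Int :=
  let n := max arr1.length arr2.length
  let p1 := arr1 ++ List.replicate (n - arr1.length) x
  let p2 := arr2 ++ List.replicate (n - arr2.length) x
  (p1.zip p2).map (fun ab => ab.1.lor ab.2)

-- ===== PRECONDITION & SPEC =====
def Spec_or_arrays (arr1 : List Int) (arr2 : List Int) (x : Int) (out : List Int) : Prop := out = or_arrays_alt arr1 arr2 x
instance (arr1 : List Int) (arr2 : List Int) (x : Int) (out : List Int) : Decidable (Spec_or_arrays arr1 arr2 x out) := by unfold Spec_or_arrays; infer_instance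

-- ===== CLAIM (what is proved, stated in full; the proofs are below) =====
def Claim_equal_or_arrays : Prop := ∀ (arr1 : List Int) (arr2 : List Int) (x : Int), Dom_or_arrays arr1 arr2 x → Spec_or_arrays arr1 arr2 x (or_arrays arr1 arr2 x)

-- ===== LEMMAS AND PROOFS =====

-- the append-accumulator loop is the map over the index list
theorem foldl_app_map {α β : Type} (l : List α) (f : α → β) (init : List β) :
    l.foldl (fun r i => r ++ [f i]) init = init ++ l.map f := by
  induction l generalizing init with
  | nil => simp
  | cons a l ih => simp [List.foldl_cons, ih]

-- a padded list indexed below the common length is getD with default x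
theorem getElem_pad (l : List Int) (x : Int) (n i : ℕ) (_hle : l.length ≤ n) (_hi : i < n)
    (h : i < (l ++ List.replicate (n - l.length) x).length) :
    (l ++ List.replicate (n - l.length) x)[i] = l.getD i x := by
  by_cases hil : i < l.length
  · rw [List.getElem_append_left hil, List.getD_eq_getElem _ _ hil]
  · rw [List.getElem_append_right (by omega), List.getElem_replicate,
      List.getD_eq_default _ _ (by omega)]

-- B computed index-wise: OR of getD's with default x over range (max of lengths)
theorem alt_eq_map (arr1 arr2 : List Int) (x : Int) :
    or_arrays_alt arr1 arr2 x =
      (List.range (max arr1.length arr2.length)).map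
        (fun i => (arr1.getD i x).lor (arr2.getD i x)) := by
  unfold or_arrays_alt
  apply List.ext_getElem
  · simp
  · intro i h1 h2
    simp only [List.getElem_map, List.getElem_zip, List.getElem_range]
    have hi : i < max arr1.length arr2.length := by simpa using h2
    rw [getElem_pad arr1 x _ i (Nat.le_max_left _ _) hi (by simp; omega),
        getElem_pad arr2 x _ i (Nat.le_max_right _ _) hi (by simp; omega)]

theorem int_lor_comm (a b : Int) : a.lor b = b.lor a := by
  cases a <;> cases b <;> simp [Int.lor, Nat.lor_comm, Nat.and_comm]

-- ===== VERDICT (by name: the statement is the Claim_ definition above) =====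
theorem or_arrays_spec : Claim_equal_or_arrays := by
  intro arr1 arr2 x _
  unfold Spec_or_arrays or_arrays
  rw [alt_eq_map]
  by_cases heq : arr1.length = arr2.length
  · simp only [heq, foldl_app_map, List.nil_append, Nat.max_self]
    refine List.map_congr_left ?_
    intro i hi
    rw [List.mem_range] at hi
    rw [List.getD_eq_getElem _ _ (by omega), List.getD_eq_getElem _ _ hi,
      List.getD_eq_getElem _ _ (by omega), List.getD_eq_getElem _ _ (by omega)]
  · by_cases hgt : arr1.length > arr2.length
    · simp only [if_neg heq, if_pos hgt, foldl_app_map, List.nil_append]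
      have hmax : max arr1.length arr2.length = arr1.length := Nat.max_eq_left (by omega)
      have hsplit : arr1.length = arr2.length + (arr1.length - arr2.length) := by omega
      rw [hmax, hsplit, List.range_add, List.map_append]
      refine congrArg₂ _ ?_ ?_
      · refine (List.map_congr_left ?_).symm
        intro i hi
        rw [List.mem_range] at hi
        rw [List.getD_eq_getElem _ _ (by omega), List.getD_eq_getElem _ _ hi,
          List.getD_eq_getElem _ _ (by omega), List.getD_eq_getElem _ _ (by omega)]
      · rw [List.range'_eq_map_range, List.map_map, List.map_map,
          show arr2.length + (arr1.length - arr2.length) - arr2.length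
            = arr1.length - arr2.length by omega]
        refine (List.map_congr_left ?_).symm
        intro i hi
        rw [List.mem_range] at hi
        have h1 : arr2.length + i < arr1.length := by omega
        simp only [Function.comp]
        rw [List.getD_eq_getElem _ _ h1, List.getD_eq_getElem _ _ h1,
          List.getD_eq_default _ _ (by omega)]
    · have hlt : arr1.length < arr2.length := by omega
      simp only [if_neg heq, if_neg hgt, foldl_app_map, List.nil_append]
      have hmax : max arr1.length arr2.length = arr2.length := Nat.max_eq_right (by omega)
      have hsplit : arr2.length = arr1.length + (arr2.length - arr1.length) := by omega
      rw [hmax, hsplit, List.range_add, List.map_append]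
      refine congrArg₂ _ ?_ ?_
      · refine (List.map_congr_left ?_).symm
        intro i hi
        rw [List.mem_range] at hi
        rw [List.getD_eq_getElem _ _ hi, List.getD_eq_getElem _ _ (by omega),
          List.getD_eq_getElem _ _ (by omega), List.getD_eq_getElem _ _ (by omega)]
      · rw [List.range'_eq_map_range, List.map_map, List.map_map,
          show arr1.length + (arr2.length - arr1.length) - arr1.length
            = arr2.length - arr1.length by omega]
        refine (List.map_congr_left ?_).symm
        intro i hi
        rw [List.mem_range] at hi
        have h1 : arr1.length + i < arr2.length := by omega
        simp only [Function.comp]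
        rw [List.getD_eq_getElem _ _ h1, List.getD_eq_getElem _ _ h1,
          List.getD_eq_default _ _ (by omega), int_lor_comm]
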